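-- pv_equiv track=rewrite | github.com/paiml/depyler | examples/hard_realworld_stats.py | stat_correlation_x1000
-- ===== SOURCE A (Python) =====
-- def stat_sum(data: list[int]) -> int:
--     """Sum all values."""
--     total: int = 0
--     idx: int = 0
--     while idx < len(data):
--         total = total + data[idx]
--         idx = idx + 1
--     return total
--
-- def stat_correlation_x1000(x_data: list[int], y_data: list[int]) -> int:
--     """Compute Pearson correlation * 1000 (integer approximation).
--     Returns value between -1000 and 1000."""
--     n: int = len(x_data)
--     if n != len(y_data) or n <= 1:
--         return 0
--     sum_x: int = stat_sum(x_data)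
--     sum_y: int = stat_sum(y_data)
--     sum_xy: int = 0
--     sum_xx: int = 0
--     sum_yy: int = 0
--     idx: int = 0
--     while idx < n:
--         sum_xy = sum_xy + x_data[idx] * y_data[idx]
--         sum_xx = sum_xx + x_data[idx] * x_data[idx]
--         sum_yy = sum_yy + y_data[idx] * y_data[idx]
--         idx = idx + 1
--     numerator: int = n * sum_xy - sum_x * sum_y
--     denom_x: int = n * sum_xx - sum_x * sum_x
--     denom_y: int = n * sum_yy - sum_y * sum_y
--     if denom_x <= 0 or denom_y <= 0:
--         return 0
--     # Integer sqrt approximation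
--     product: int = denom_x * denom_y
--     sqrt_approx: int = 1
--     while sqrt_approx * sqrt_approx < product:
--         sqrt_approx = sqrt_approx + 1
--     return (numerator * 1000) // sqrt_approx
-- ===== SOURCE B (Python) =====
-- def stat_correlation_x1000(x_data: list[int], y_data: list[int]) -> int:
--     """Compute Pearson correlation * 1000 (integer approximation).
--     Single fused accumulation pass + binary-search integer sqrt."""
--     n = len(x_data)
--     if n != len(y_data) or n <= 1:
--         return 0
--     sum_x = 0
--     sum_y = 0
--     sum_xy = 0
--     sum_xx = 0
--     sum_yy = 0
--     for xv, yv in zip(x_data, y_data):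
--         sum_x += xv
--         sum_y += yv
--         sum_xy += xv * yv
--         sum_xx += xv * xv
--         sum_yy += yv * yv
--     numerator = n * sum_xy - sum_x * sum_y
--     denom_x = n * sum_xx - sum_x * sum_x
--     denom_y = n * sum_yy - sum_y * sum_y
--     if denom_x <= 0 or denom_y <= 0:
--         return 0
--     product = denom_x * denom_y
--     # binary search for the smallest s >= 1 with s*s >= product
--     lo = 1
--     hi = product
--     while lo < hi:
--         mid = (lo + hi) // 2
--         if mid * mid < product:
--             lo = mid + 1
--         else:
--             hi = mid
--     return (numerator * 1000) // lo
-- ===== Notes on version B (the rewrite author's own statement) =====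
-- stated objective: faster
-- what changed: The three separate accumulation scans (two stat_sum calls plus the index loop) are fused into one pass over zip(x_data, y_data), and the unary counting integer-sqrt loop is replaced by a binary search for the smallest s with s*s >= product.
import Mathlib
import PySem

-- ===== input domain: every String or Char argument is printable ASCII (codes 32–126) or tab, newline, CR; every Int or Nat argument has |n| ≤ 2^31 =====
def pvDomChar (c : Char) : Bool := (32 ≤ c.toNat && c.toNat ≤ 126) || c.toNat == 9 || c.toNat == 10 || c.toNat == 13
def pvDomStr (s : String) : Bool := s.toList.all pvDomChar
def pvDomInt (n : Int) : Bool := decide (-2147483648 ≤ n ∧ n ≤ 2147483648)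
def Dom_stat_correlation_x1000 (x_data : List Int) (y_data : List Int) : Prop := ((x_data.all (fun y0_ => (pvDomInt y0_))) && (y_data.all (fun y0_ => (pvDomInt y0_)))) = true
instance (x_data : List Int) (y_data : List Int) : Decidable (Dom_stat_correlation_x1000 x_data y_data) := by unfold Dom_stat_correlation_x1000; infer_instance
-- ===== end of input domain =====

-- B fuses A's three accumulation scans into one pass over the zipped lists and
-- replaces the unary counting integer-sqrt loop by a binary search (objective: faster).

-- ===== PORT A =====

-- while idx < len(data): total += data[idx]
def stat_sum (data : List Int) : Int :=
  (PySem.List.pyRange 0 data.length 1).foldl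
    (fun total idx => total + PySem.List.pyGetD data idx 0) 0

-- A's 'while sqrt_approx * sqrt_approx < product' counting loop; fuel only makes it total
def sqrtCountLoop : Nat → Int → Int → Int
  | 0, _, s => s
  | fuel + 1, p, s => if s * s < p then sqrtCountLoop fuel p (s + 1) else s

def stat_correlation_x1000 (x_data : List Int) (y_data : List Int) : Int :=
  let n : Int := x_data.length
  if n ≠ (y_data.length : Int) ∨ n ≤ 1 then 0
  else
    let sum_x := stat_sum x_data
    let sum_y := stat_sum y_data
    let acc := (PySem.List.pyRange 0 n 1).foldl
      (fun (acc : Int × Int × Int) idx =>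
        (acc.1 + PySem.List.pyGetD x_data idx 0 * PySem.List.pyGetD y_data idx 0,
         acc.2.1 + PySem.List.pyGetD x_data idx 0 * PySem.List.pyGetD x_data idx 0,
         acc.2.2 + PySem.List.pyGetD y_data idx 0 * PySem.List.pyGetD y_data idx 0))
      (0, 0, 0)
    let numerator := n * acc.1 - sum_x * sum_y
    let denom_x := n * acc.2.1 - sum_x * sum_x
    let denom_y := n * acc.2.2 - sum_y * sum_y
    if denom_x ≤ 0 ∨ denom_y ≤ 0 then 0
    else
      let product := denom_x * denom_y
      let sqrt_approx := sqrtCountLoop product.toNat product 1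
      PySem.Int.floordiv (numerator * 1000) sqrt_approx

-- ===== PORT B =====

-- B's 'while lo < hi' binary search; fuel only makes it total
def sqrtBinLoop : Nat → Int → Int → Int → Int
  | 0, _, lo, _ => lo
  | fuel + 1, p, lo, hi =>
    if lo < hi then
      let mid := PySem.Int.floordiv (lo + hi) 2
      if mid * mid < p then sqrtBinLoop fuel p (mid + 1) hi
      else sqrtBinLoop fuel p lo mid
    else lo

def stat_correlation_x1000_alt (x_data : List Int) (y_data : List Int) : Int :=
  let n : Int := x_data.length
  if n ≠ (y_data.length : Int) ∨ n ≤ 1 then 0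
  else
    let acc := (x_data.zip y_data).foldl
      (fun (a : Int × Int × Int × Int × Int) p =>
        (a.1 + p.1, a.2.1 + p.2, a.2.2.1 + p.1 * p.2,
         a.2.2.2.1 + p.1 * p.1, a.2.2.2.2 + p.2 * p.2))
      (0, 0, 0, 0, 0)
    let numerator := n * acc.2.2.1 - acc.1 * acc.2.1
    let denom_x := n * acc.2.2.2.1 - acc.1 * acc.1
    let denom_y := n * acc.2.2.2.2 - acc.2.1 * acc.2.1
    if denom_x ≤ 0 ∨ denom_y ≤ 0 then 0
    else
      let product := denom_x * denom_y
      let lo := sqrtBinLoop product.toNat product 1 product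
      PySem.Int.floordiv (numerator * 1000) lo

-- ===== PRECONDITION & SPEC =====
def Spec_stat_correlation_x1000 (x_data : List Int) (y_data : List Int) (out : Int) : Prop := out = stat_correlation_x1000_alt x_data y_data
instance (x_data : List Int) (y_data : List Int) (out : Int) : Decidable (Spec_stat_correlation_x1000 x_data y_data out) := by unfold Spec_stat_correlation_x1000; infer_instance

-- ===== CLAIM (what is proved, stated in full; the proofs are below) =====
def Claim_equal_stat_correlation_x1000 : Prop := ∀ (x_data : List Int) (y_data : List Int), Dom_stat_correlation_x1000 x_data y_data → Spec_stat_correlation_x1000 x_data y_data (stat_correlation_x1000 x_data y_data)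

-- ===== LEMMAS AND PROOFS =====

-- the smallest s ≥ 1 with p ≤ s*s
def IsCeilSqrt (p k : Int) : Prop :=
  1 ≤ k ∧ p ≤ k * k ∧ ∀ j : Int, 1 ≤ j → j < k → j * j < p

theorem isCeilSqrt_unique {p k₁ k₂ : Int} (h₁ : IsCeilSqrt p k₁) (h₂ : IsCeilSqrt p k₂) :
    k₁ = k₂ := by
  obtain ⟨a1, a2, a3⟩ := h₁
  obtain ⟨b1, b2, b3⟩ := h₂
  rcases lt_trichotomy k₁ k₂ with h | h | h
  · exact absurd a2 (not_le.mpr (b3 k₁ a1 h))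
  · exact h
  · exact absurd b2 (not_le.mpr (a3 k₂ b1 h))

theorem sqrtCountLoop_correct (fuel : Nat) (p s : Int) (hs : 1 ≤ s)
    (hlow : ∀ j : Int, 1 ≤ j → j < s → j * j < p)
    (hfuel : (p - s * s).toNat ≤ fuel) :
    IsCeilSqrt p (sqrtCountLoop fuel p s) := by
  induction fuel generalizing s with
  | zero =>
    have : p ≤ s * s := by omega
    exact ⟨hs, by simpa [sqrtCountLoop, not_lt.mpr this] using this, by
      simpa [sqrtCountLoop] using hlow⟩
  | succ f ih =>
    by_cases h : s * s < p
    · have hstep : s * s < (s + 1) * (s + 1) := by nlinarith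
      have : sqrtCountLoop (f + 1) p s = sqrtCountLoop f p (s + 1) := by
        simp [sqrtCountLoop, h]
      rw [this]
      refine ih (s + 1) (by omega) ?_ (by omega)
      intro j hj1 hj2
      rcases lt_or_eq_of_le (by omega : j ≤ s) with hj | hj
      · exact hlow j hj1 hj
      · simpa [hj] using h
    · have hres : sqrtCountLoop (f + 1) p s = s := by simp [sqrtCountLoop, h]
      exact ⟨by simpa [hres] using hs, by simpa [hres] using not_lt.mp h,
        by simpa [hres] using hlow⟩

theorem sqrtBinLoop_correct (fuel : Nat) (p : Int) :
    ∀ lo hi : Int, 1 ≤ lo → lo ≤ hi → p ≤ hi * hi →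
    (∀ j : Int, 1 ≤ j → j < lo → j * j < p) →
    (hi - lo).toNat ≤ fuel →
    IsCeilSqrt p (sqrtBinLoop fuel p lo hi) := by
  induction fuel with
  | zero =>
    intro lo hi h1 h2 h3 h4 h5
    have hlh : lo = hi := by omega
    subst hlh
    exact ⟨h1, by simpa [sqrtBinLoop] using h3, by simpa [sqrtBinLoop] using h4⟩
  | succ f ih =>
    intro lo hi h1 h2 h3 h4 h5
    by_cases hlt : lo < hi
    · have hmid : PySem.Int.floordiv (lo + hi) 2 = (lo + hi) / 2 :=
        PySem.Int.floordiv_eq_ediv_of_pos (by omega)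
      have hbnd : lo ≤ (lo + hi) / 2 ∧ (lo + hi) / 2 < hi := by omega
      set mid := (lo + hi) / 2 with hm
      have hun : sqrtBinLoop (f + 1) p lo hi =
          if mid * mid < p then sqrtBinLoop f p (mid + 1) hi else sqrtBinLoop f p lo mid := by
        simp only [sqrtBinLoop, if_pos hlt, hmid]
      by_cases hc : mid * mid < p
      · rw [hun, if_pos hc]
        refine ih (mid + 1) hi (by omega) (by omega) h3 ?_ (by omega)
        intro j hj1 hj2
        rcases lt_or_eq_of_le (by omega : j ≤ mid) with hj | hj
        · have hmono : j * j ≤ mid * mid :=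
            mul_le_mul (by omega) (by omega) (by omega) (by omega)
          omega
        · simpa [hj] using hc
      · rw [hun, if_neg hc]
        exact ih lo mid h1 (by omega) (not_lt.mp hc) h4 (by omega)
    · have : sqrtBinLoop (f + 1) p lo hi = lo := by simp [sqrtBinLoop, hlt]
      have hlh : lo = hi := by omega
      subst hlh
      rw [this]
      exact ⟨h1, h3, h4⟩

theorem sqrt_loops_agree (p : Int) (hp : 1 ≤ p) :
    sqrtCountLoop p.toNat p 1 = sqrtBinLoop p.toNat p 1 p := by
  have hpp : p ≤ p * p := by nlinarith
  have h1 := sqrtCountLoop_correct p.toNat p 1 le_rfl (by intro j hj1 hj2; omega) (by omega)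
  have h2 := sqrtBinLoop_correct p.toNat p 1 p le_rfl hp hpp (by intro j hj1 hj2; omega) (by omega)
  exact isCeilSqrt_unique h1 h2

-- the index-based pair of reads equals the zipped list, when the lengths agree
theorem pyRange_map_pair_eq_zip (x y : List Int) (h : x.length = y.length) :
    (PySem.List.pyRange 0 (x.length : Int) 1).map
      (fun i => (PySem.List.pyGetD x i 0, PySem.List.pyGetD y i 0)) = x.zip y := by
  apply List.ext_getElem
  · simp [PySem.List.length_pyRange_one, h]
  · intro k hk1 hk2
    have hkx : k < x.length := by
      simpa [PySem.List.length_pyRange_one] using hk1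
    have hky : k < y.length := by omega
    have hr : (PySem.List.pyRange 0 (x.length : Int) 1)[k]'(by
        simpa [PySem.List.length_pyRange_one] using hkx) = (k : Int) := by
      have hk' : k < (PySem.List.pyRange 0 (x.length : Int) 1).length := by
        simpa [PySem.List.length_pyRange_one] using hkx
      simp [PySem.List.getElem_pyRange_one 0 (x.length : Int) k hk']
    simp only [List.getElem_map, hr, List.getElem_zip]
    rw [PySem.List.pyGetD_eq_getElem x 0 (by omega) (by exact_mod_cast hkx),
        PySem.List.pyGetD_eq_getElem y 0 (by omega) (by exact_mod_cast hky)]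
    simp

-- B's five-component fold, expressed through sums over the zipped list
theorem bLoop_eq (l : List (Int × Int)) :
    ∀ a1 a2 a3 a4 a5 : Int,
    l.foldl (fun (a : Int × Int × Int × Int × Int) p =>
        (a.1 + p.1, a.2.1 + p.2, a.2.2.1 + p.1 * p.2,
         a.2.2.2.1 + p.1 * p.1, a.2.2.2.2 + p.2 * p.2)) (a1, a2, a3, a4, a5)
      = (a1 + (l.map Prod.fst).sum, a2 + (l.map Prod.snd).sum,
         a3 + (l.map (fun p => p.1 * p.2)).sum, a4 + (l.map (fun p => p.1 * p.1)).sum,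
         a5 + (l.map (fun p => p.2 * p.2)).sum) := by
  induction l with
  | nil => intro a1 a2 a3 a4 a5; simp
  | cons hd tl ih =>
    intro a1 a2 a3 a4 a5
    simp only [List.foldl_cons, List.map_cons, List.sum_cons, ih]
    ring_nf

-- A's three-component fold over the zipped list, expressed through the same sums
theorem aLoop_eq (l : List (Int × Int)) :
    ∀ a1 a2 a3 : Int,
    l.foldl (fun (a : Int × Int × Int) p =>
        (a.1 + p.1 * p.2, a.2.1 + p.1 * p.1, a.2.2 + p.2 * p.2)) (a1, a2, a3)
      = (a1 + (l.map (fun p => p.1 * p.2)).sum, a2 + (l.map (fun p => p.1 * p.1)).sum,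
         a3 + (l.map (fun p => p.2 * p.2)).sum) := by
  induction l with
  | nil => intro a1 a2 a3; simp
  | cons hd tl ih =>
    intro a1 a2 a3
    simp only [List.foldl_cons, List.map_cons, List.sum_cons, ih]
    ring_nf

-- stat_sum is the plain sum
theorem stat_sum_eq (data : List Int) : stat_sum data = data.sum := by
  unfold stat_sum
  rw [show ((data.length : Int)) = ((data.length : Int)) from rfl]
  rw [PySem.List.foldl_pyRange_zero_pyGetD' data 0 (fun t v => t + v) 0]
  induction data using List.reverseRecOn with
  | nil => simp
  | append_singleton xs x ih => simp [ih]

-- ===== VERDICT (by name: the statement is the Claim_ definition above) =====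
theorem stat_correlation_x1000_spec : Claim_equal_stat_correlation_x1000 := by
  intro x y _
  unfold Spec_stat_correlation_x1000 stat_correlation_x1000 stat_correlation_x1000_alt
  by_cases hg : x.length = y.length ∧ 2 ≤ x.length
  · have hcond : ¬((x.length : Int) ≠ (y.length : Int) ∨ (x.length : Int) ≤ 1) := by omega
    obtain ⟨hlen', _⟩ := hg
    simp only [if_neg hcond]
    have hfold :
        (PySem.List.pyRange 0 (x.length : Int) 1).foldl
          (fun (acc : Int × Int × Int) idx =>
            (acc.1 + PySem.List.pyGetD x idx 0 * PySem.List.pyGetD y idx 0,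
             acc.2.1 + PySem.List.pyGetD x idx 0 * PySem.List.pyGetD x idx 0,
             acc.2.2 + PySem.List.pyGetD y idx 0 * PySem.List.pyGetD y idx 0)) (0, 0, 0)
        = (x.zip y).foldl (fun (a : Int × Int × Int) p =>
            (a.1 + p.1 * p.2, a.2.1 + p.1 * p.1, a.2.2 + p.2 * p.2)) (0, 0, 0) := by
      rw [← pyRange_map_pair_eq_zip x y hlen', List.foldl_map]
    have hx : ((x.zip y).map Prod.fst).sum = x.sum := by
      rw [List.map_fst_zip (by omega)]
    have hy : ((x.zip y).map Prod.snd).sum = y.sum := by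
      rw [List.map_snd_zip (by omega)]
    simp only [hfold, aLoop_eq, bLoop_eq, stat_sum_eq, hx, hy, zero_add]
    set n : Int := (x.length : Int) with hn
    set sxy := ((x.zip y).map (fun p => p.1 * p.2)).sum
    set sxx := ((x.zip y).map (fun p => p.1 * p.1)).sum
    set syy := ((x.zip y).map (fun p => p.2 * p.2)).sum
    by_cases hd : n * sxx - x.sum * x.sum ≤ 0 ∨ n * syy - y.sum * y.sum ≤ 0
    · rw [if_pos hd, if_pos hd]
    · rw [if_neg hd, if_neg hd]
      rw [not_or] at hd
      simp only [not_le] at hd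
      have hp : 1 ≤ (n * sxx - x.sum * x.sum) * (n * syy - y.sum * y.sum) := by
        have := mul_pos hd.1 hd.2
        omega
      rw [sqrt_loops_agree _ hp]
  · have hcond : (x.length : Int) ≠ (y.length : Int) ∨ (x.length : Int) ≤ 1 := by omega
    simp only [if_pos hcond]
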